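-- pv_equiv track=rewrite | github.com/XOXNO/rs-lending-xlm | verification/certora/check_orphans.py | profile_rule_args
-- ===== SOURCE A (Python) =====
-- def profile_rule_args(args: list[str]) -> list[str]:
--     rules: list[str] = []
--     index = 0
--     while index < len(args):
--         if args[index] in {"--rule", "--exclude_rule"}:
--             index += 1
--             while index < len(args) and not args[index].startswith("--"):
--                 rules.append(args[index])
--                 index += 1
--             continue
--         index += 1
--     return rules
-- ===== SOURCE B (Python) =====
-- def profile_rule_args(args: list[str]) -> list[str]:
--     rules: list[str] = []
--     collecting = False
--     for arg in args:
--         if arg.startswith("--"):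
--             collecting = arg in {"--rule", "--exclude_rule"}
--         elif collecting:
--             rules.append(arg)
--     return rules
-- ===== Notes on version B (the rewrite author's own statement) =====
-- stated objective: simpler
-- what changed: Replaced the nested index-driven while loops (inner loop consuming tokens after a rule flag, with continue) by a single flat for-loop over the tokens that maintains a boolean 'collecting' flag.
import Mathlib
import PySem

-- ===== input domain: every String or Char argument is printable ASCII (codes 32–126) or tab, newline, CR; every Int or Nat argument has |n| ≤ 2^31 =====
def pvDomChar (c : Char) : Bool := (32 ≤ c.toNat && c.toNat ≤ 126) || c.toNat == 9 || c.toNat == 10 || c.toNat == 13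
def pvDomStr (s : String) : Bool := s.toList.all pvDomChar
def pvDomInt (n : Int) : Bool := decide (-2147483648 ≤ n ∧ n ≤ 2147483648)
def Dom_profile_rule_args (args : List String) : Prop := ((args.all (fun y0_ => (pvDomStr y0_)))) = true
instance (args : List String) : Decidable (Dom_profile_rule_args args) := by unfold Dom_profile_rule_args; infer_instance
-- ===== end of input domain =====

-- B replaces A's nested index-driven while loops by a single flat pass maintaining a boolean flag (objective: simpler).


-- ===== PORT A =====
-- A's outer while loop / inner while loop, transliterated as two mutually recursive
-- functions over the index (the 'continue' returns from the inner loop to the outer one).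
mutual
def pvOuterA (args : List String) (index : Nat) (rules : List String) : List String :=
  if index < args.length then
    if args.getD index "" == "--rule" || args.getD index "" == "--exclude_rule" then
      pvInnerA args (index + 1) rules
    else
      pvOuterA args (index + 1) rules
  else rules
  termination_by 2 * (args.length - index)
  decreasing_by
    · omega
    · omega
def pvInnerA (args : List String) (index : Nat) (rules : List String) : List String :=
  if index < args.length && !(PySem.Str.startswith (args.getD index "") "--") then
    pvInnerA args (index + 1) (rules ++ [args.getD index ""])
  else
    pvOuterA args index rules
  termination_by 2 * (args.length - index) + 1
  decreasing_by
    · rename_i h; simp at h; omega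
    · omega
end

def profile_rule_args (args : List String) : List String :=
  pvOuterA args 0 []

-- ===== PORT B =====
-- B: one flat fold over the tokens with state (collecting, rules).
def profile_rule_args_alt (args : List String) : List String :=
  (args.foldl
    (fun st arg =>
      if PySem.Str.startswith arg "--" then
        (arg == "--rule" || arg == "--exclude_rule", st.2)
      else if st.1 then
        (st.1, st.2 ++ [arg])
      else st)
    (false, [])).2

-- ===== PRECONDITION & SPEC =====
def Spec_profile_rule_args (args : List String) (out : List String) : Prop := out = profile_rule_args_alt args
instance (args : List String) (out : List String) : Decidable (Spec_profile_rule_args args out) := by unfold Spec_profile_rule_args; infer_instance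

-- ===== CLAIM (what is proved, stated in full; the proofs are below) =====
def Claim_equal_profile_rule_args : Prop := ∀ (args : List String), Dom_profile_rule_args args → Spec_profile_rule_args args (profile_rule_args args)

-- ===== LEMMAS AND PROOFS =====

-- Proof-only recursive characterisation of B's fold (with a given initial flag).
def pvGoB (l : List String) (b : Bool) : List String :=
  match l with
  | [] => []
  | a :: rest =>
    if PySem.Str.startswith a "--" then pvGoB rest (a == "--rule" || a == "--exclude_rule")
    else if b then a :: pvGoB rest b
    else pvGoB rest b

theorem pvFoldB_spec (l : List String) (b : Bool) (acc : List String) :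
    (l.foldl
      (fun st arg =>
        if PySem.Str.startswith arg "--" then
          (arg == "--rule" || arg == "--exclude_rule", st.2)
        else if st.1 then
          (st.1, st.2 ++ [arg])
        else st)
      (b, acc)).2 = acc ++ pvGoB l b := by
  induction l generalizing b acc with
  | nil => simp [pvGoB]
  | cons a rest ih =>
    rw [List.foldl_cons, pvGoB]
    by_cases hs : PySem.Str.startswith a "--" = true
    · rw [if_pos hs, if_pos hs]
      exact ih _ acc
    · rw [if_neg hs, if_neg hs]
      cases b
      · simpa using ih false acc
      · simpa [List.append_assoc] using ih true (acc ++ [a])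

theorem pvFlagStarts (a : String) (h : (a == "--rule" || a == "--exclude_rule") = true) :
    PySem.Str.startswith a "--" = true := by
  simp only [Bool.or_eq_true, beq_iff_eq] at h
  rcases h with h | h <;> subst h <;> decide

theorem pvKeyA_ge (args : List String) (index : Nat) (rules : List String)
    (hge : args.length ≤ index) :
    pvOuterA args index rules = rules ∧ pvInnerA args index rules = rules := by
  have h1 : ¬ index < args.length := Nat.not_lt.mpr hge
  constructor
  · rw [pvOuterA, if_neg h1]
  · rw [pvInnerA, if_neg (by simp [h1]), pvOuterA, if_neg h1]

theorem pvKeyA (n : Nat) :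
    ∀ (args : List String) (index : Nat) (rules : List String), args.length - index ≤ n →
      pvOuterA args index rules = rules ++ pvGoB (args.drop index) false ∧
      pvInnerA args index rules = rules ++ pvGoB (args.drop index) true := by
  induction n with
  | zero =>
    intro args index rules h
    have hge : args.length ≤ index := by omega
    rw [List.drop_eq_nil_of_le hge]
    simpa [pvGoB] using pvKeyA_ge args index rules hge
  | succ n ih =>
    intro args index rules h
    by_cases hlt : index < args.length
    · have hdrop : args.drop index = args[index] :: args.drop (index + 1) :=
        List.drop_eq_getElem_cons hlt
      have hgd : args.getD index "" = args[index] := List.getD_eq_getElem args "" hlt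
      have hn : args.length - (index + 1) ≤ n := by omega
      have houter : pvOuterA args index rules = rules ++ pvGoB (args.drop index) false := by
        rw [pvOuterA, if_pos hlt]
        by_cases hf : (args.getD index "" == "--rule" || args.getD index "" == "--exclude_rule") = true
        · have hf2 : (args[index] == "--rule" || args[index] == "--exclude_rule") = true := by
            rw [← hgd]; exact hf
          have hs2 : PySem.Str.startswith args[index] "--" = true := by
            rw [← hgd]; exact pvFlagStarts _ hf
          rw [if_pos hf, (ih args (index + 1) rules hn).2, hdrop, pvGoB, if_pos hs2, hf2]
        · have hf2 : (args[index] == "--rule" || args[index] == "--exclude_rule") = false := by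
            rw [← hgd]; exact eq_false_of_ne_true hf
          rw [if_neg hf, (ih args (index + 1) rules hn).1, hdrop, pvGoB]
          by_cases hs2 : PySem.Str.startswith args[index] "--" = true
          · rw [if_pos hs2, hf2]
          · rw [if_neg hs2]; simp
      refine ⟨houter, ?_⟩
      rw [pvInnerA]
      by_cases hs2 : PySem.Str.startswith (args.getD index "") "--" = true
      · rw [if_neg (by rw [Bool.and_eq_true]; rintro ⟨-, hb⟩; rw [hs2] at hb; simp at hb),
            houter, hdrop]
        rw [hgd] at hs2
        simp only [pvGoB, if_pos hs2]
      · have hsf : PySem.Str.startswith (args.getD index "") "--" = false :=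
          eq_false_of_ne_true hs2
        rw [if_pos (by rw [Bool.and_eq_true, hsf]; exact ⟨by simpa using hlt, rfl⟩),
            (ih args (index + 1) (rules ++ [args.getD index ""]) hn).2, hdrop, pvGoB]
        rw [hgd] at hs2
        rw [if_neg hs2, hgd]
        simp [List.append_assoc]
    · have hge : args.length ≤ index := by omega
      rw [List.drop_eq_nil_of_le hge]
      simpa [pvGoB] using pvKeyA_ge args index rules hge

-- ===== VERDICT (by name: the statement is the Claim_ definition above) =====
theorem profile_rule_args_spec : Claim_equal_profile_rule_args := by
  intro args _
  unfold Spec_profile_rule_args profile_rule_args profile_rule_args_alt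
  rw [(pvKeyA args.length args 0 [] (by omega)).1, pvFoldB_spec]
  simp
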